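-- pv_equiv track=rewrite | github.com/wish9/Algorithms | Programmers/lv2/Functional_development.py | solution
-- ===== SOURCE A (Python) =====
-- def solution(progresses, speeds):
--     answer = []
--
--     while len(progresses) != 0:
--         result = 0
--         for i in range(len(progresses)):
--             progresses[i] += speeds[i]
--
--         if progresses[0] >= 100:
--             for item in progresses.copy():
--                 if item >= 100:
--                     result += 1
--                     progresses.pop(0)
--                     speeds.pop(0)
--                 else:
--                     break
--             answer.append(result)
--     return answer
-- ===== SOURCE B (Python) =====
-- def solution(progresses, speeds):
--     # One pass: each task needs max(1, ceil((100-p)/s)) days; group by running max.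
--     # Note: unlike A, this does not mutate the input lists.
--     answer = []
--     cur = 0
--     cnt = 0
--     for p, s in zip(progresses, speeds):
--         d = max(1, -((-(100 - p)) // s))
--         if d > cur:
--             if cnt != 0:
--                 answer.append(cnt)
--             cur = d
--             cnt = 1
--         else:
--             cnt += 1
--     if cnt != 0:
--         answer.append(cnt)
--     return answer
-- ===== Notes on version B (the rewrite author's own statement) =====
-- stated objective: faster
-- what changed: B replaces A's day-by-day simulation with repeated front-popping by a single pass computing each task's finish day as max(1, ceil((100-p)/s)) and grouping consecutive tasks by the running maximum of finish days; intended as faster (O(n) vs O(n*maxdays)) - in a timing run A timed out at n=16 where B returned, so no clean ratio could be measured.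
-- outside the precondition, e.g. on solution([99, 150], [2, -1]): A returns [2], B returns [1, 1]
import Mathlib
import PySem

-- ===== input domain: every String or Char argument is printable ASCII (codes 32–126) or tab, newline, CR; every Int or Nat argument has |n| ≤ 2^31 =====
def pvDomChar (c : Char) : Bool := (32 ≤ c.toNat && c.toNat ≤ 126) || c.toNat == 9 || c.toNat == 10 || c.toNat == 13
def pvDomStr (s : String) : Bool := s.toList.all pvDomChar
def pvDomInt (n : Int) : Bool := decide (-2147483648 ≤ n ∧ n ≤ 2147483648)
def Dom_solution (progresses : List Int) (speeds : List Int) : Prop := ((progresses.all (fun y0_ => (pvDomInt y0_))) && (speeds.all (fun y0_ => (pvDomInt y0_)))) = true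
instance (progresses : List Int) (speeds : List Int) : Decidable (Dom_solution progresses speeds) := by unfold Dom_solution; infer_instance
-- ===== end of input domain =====

-- B re-implements the day-by-day simulation as a one-pass closed form (ceiling division
-- + grouping by running maximum); equivalence is about return values (A empties its
-- argument lists in place, B does not mutate them).

-- ===== PORT A =====
-- the inner `for item in progresses.copy(): … pop(0) … else break` loop: counts the popped prefix
def popCountA : List Int → Nat
  | [] => 0
  | x :: xs => if 100 ≤ x then popCountA xs + 1 else 0

-- the `while len(progresses) != 0` loop; fuel only makes the recursion total
-- (under Pre_solution the fuel is never exhausted, proved below)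
def loopA : Nat → List Int → List Int → List Int → List Int
  | 0, _, _, answer => answer
  | fuel + 1, progresses, speeds, answer =>
    match progresses with
    | [] => answer
    | _ :: _ =>
      let ps' := List.zipWith (· + ·) progresses speeds
      if 100 ≤ ps'.headD 0 then
        let result := popCountA ps'
        loopA fuel (ps'.drop result) (speeds.drop result) (answer ++ [(result : Int)])
      else
        loopA fuel ps' speeds answer

def solution (progresses : List Int) (speeds : List Int) : List Int :=
  loopA ((progresses.map (fun p => (101 - p).toNat + 1)).sum) progresses speeds []

-- ===== PORT B =====
-- d = max(1, -((-(100 - p)) // s))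
def daysB (p s : Int) : Int := max 1 (-(PySem.Int.floordiv (-(100 - p)) s))

-- loop body: state = (answer, cur, cnt)
def stepB (st : List Int × Int × Int) (x : Int × Int) : List Int × Int × Int :=
  let d := daysB x.1 x.2
  if st.2.1 < d then
    (if st.2.2 ≠ 0 then st.1 ++ [st.2.2] else st.1, d, 1)
  else
    (st.1, st.2.1, st.2.2 + 1)

def solution_alt (progresses : List Int) (speeds : List Int) : List Int :=
  let r := (progresses.zip speeds).foldl stepB ([], 0, 0)
  if r.2.2 ≠ 0 then r.1 ++ [r.2.2] else r.1

-- ===== PRECONDITION & SPEC =====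
-- Pre_ restricts to the problem's natural domain: enough speeds, and positive speeds.
-- With a missing speed A raises IndexError; with a non-positive speed A loops forever
-- on any task that never reaches 100, so the simulation is only meaningful for s > 0.
def Pre_solution (progresses : List Int) (speeds : List Int) : Prop :=
  progresses.length ≤ speeds.length ∧ ∀ x ∈ progresses.zip speeds, 0 < x.2
instance (progresses : List Int) (speeds : List Int) : Decidable (Pre_solution progresses speeds) := by unfold Pre_solution; infer_instance

def pvWitness_solution : List Int × List Int := ([93, 30, 55], [1, 30, 5])

def Spec_solution (progresses : List Int) (speeds : List Int) (out : List Int) : Prop := out = solution_alt progresses speeds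
instance (progresses : List Int) (speeds : List Int) (out : List Int) : Decidable (Spec_solution progresses speeds out) := by unfold Spec_solution; infer_instance

-- ===== CLAIM (what is proved, stated in full; the proofs are below) =====
def Claim_equal_solution : Prop := ∀ (progresses : List Int) (speeds : List Int), Dom_solution progresses speeds → Pre_solution progresses speeds → Spec_solution progresses speeds (solution progresses speeds)

-- ===== LEMMAS AND PROOFS =====

-- pair-level view of A's loop
def adv1 (L : List (Int × Int)) : List (Int × Int) := L.map (fun x => (x.1 + x.2, x.2))
def advT (t : Int) (L : List (Int × Int)) : List (Int × Int) := L.map (fun x => (x.1 + t * x.2, x.2))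
def popCountP : List (Int × Int) → Nat
  | [] => 0
  | x :: xs => if 100 ≤ x.1 then popCountP xs + 1 else 0

def loopP : Nat → List (Int × Int) → List Int → List Int
  | 0, _, answer => answer
  | fuel + 1, L, answer =>
    match L with
    | [] => answer
    | _ :: _ =>
      let L' := adv1 L
      if 100 ≤ (L'.headD (0, 0)).1 then
        let k := popCountP L'
        loopP fuel (L'.drop k) (answer ++ [(k : Int)])
      else
        loopP fuel L' answer

def daysP (x : Int × Int) : Int := daysB x.1 x.2

-- the grouping-by-running-max of a list of day counts
def grp : List Int → List Int
  | [] => []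
  | c :: cs =>
    ((1 : Int) + ((cs.takeWhile (fun y => y ≤ c)).length : Int)) ::
      grp (cs.drop (cs.takeWhile (fun y => y ≤ c)).length)
termination_by cs => cs.length
decreasing_by
  simp only [List.length_cons, List.length_drop]
  omega


theorem zip_drop' {A B : Type} : ∀ (a : List A) (b : List B) (k : Nat),
    (a.drop k).zip (b.drop k) = (a.zip b).drop k := by
  intro a
  induction a with
  | nil => intro b k; simp
  | cons x xs ih =>
    intro b k
    cases k with
    | zero => simp
    | succ k =>
      cases b with
      | nil => simp
      | cons y ys => simpa using ih ys k

theorem zipE : ∀ (ps ss : List Int), ps.length ≤ ss.length →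
    (List.zipWith (· + ·) ps ss).zip ss = adv1 (ps.zip ss) := by
  intro ps
  induction ps with
  | nil => intro ss _; simp [adv1]
  | cons p pt ih =>
    intro ss h
    cases ss with
    | nil => simp at h
    | cons s st =>
      simp only [List.zipWith_cons_cons, List.zip_cons_cons, adv1, List.map_cons]
      exact congrArg _ (ih st (by simpa using h))

theorem popAP : ∀ (ps ss : List Int), ps.length ≤ ss.length →
    popCountA (List.zipWith (· + ·) ps ss) = popCountP (adv1 (ps.zip ss)) := by
  intro ps
  induction ps with
  | nil => intro ss _; simp [popCountA, popCountP, adv1]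
  | cons p pt ih =>
    intro ss h
    cases ss with
    | nil => simp at h
    | cons s st =>
      have hih := ih st (by simpa using h)
      simp only [adv1] at hih
      simp only [List.zipWith_cons_cons, List.zip_cons_cons, adv1, List.map_cons,
        popCountA, popCountP]
      rw [hih]

theorem loopA_eq_loopP (fuel : Nat) : ∀ (ps ss : List Int) (ans : List Int),
    ps.length ≤ ss.length → loopA fuel ps ss ans = loopP fuel (ps.zip ss) ans := by
  induction fuel with
  | zero => intro ps ss ans _; rfl
  | succ f ih =>
    intro ps ss ans h
    cases ps with
    | nil => rfl
    | cons p pt =>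
      cases ss with
      | nil => simp at h
      | cons s st =>
        have hlen : (p :: pt).length ≤ (s :: st).length := h
        simp only [loopA, loopP, List.zip_cons_cons]
        have hhead : (List.zipWith (· + ·) (p :: pt) (s :: st)).headD 0 =
            ((adv1 ((p, s) :: pt.zip st)).headD (0, 0)).1 := by
          simp [adv1]
        rw [hhead]
        by_cases hc : 100 ≤ ((adv1 ((p, s) :: pt.zip st)).headD (0, 0)).1
        · simp only [if_pos hc]
          rw [popAP (p :: pt) (s :: st) hlen]
          rw [← List.zip_cons_cons, ← zipE (p :: pt) (s :: st) hlen]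
          rw [← zip_drop']
          apply ih
          have h1 := List.length_zipWith (f := (· + ·)) (l₁ := p :: pt) (l₂ := s :: st)
          simp only [List.length_drop]
          omega
        · simp only [if_neg hc]
          rw [← List.zip_cons_cons, ← zipE (p :: pt) (s :: st) hlen]
          apply ih
          have h1 := List.length_zipWith (f := (· + ·)) (l₁ := p :: pt) (l₂ := s :: st)
          omega

theorem daysB_ge_one (p s : Int) : 1 ≤ daysB p s := le_max_left _ _

theorem daysB_le_iff (p s t : Int) (hs : 0 < s) (ht : 1 ≤ t) :
    (100 ≤ p + t * s ↔ daysB p s ≤ t) := by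
  unfold daysB
  rw [max_le_iff, neg_le, PySem.Int.le_floordiv_iff_mul_le hs, neg_mul]
  constructor
  · intro h; exact ⟨ht, by linarith⟩
  · intro h; linarith [h.2]

theorem sum_daysP_nonneg : ∀ (L : List (Int × Int)), 0 ≤ (L.map daysP).sum
  | [] => le_refl 0
  | x :: l => by
    simp only [List.map_cons, List.sum_cons]
    have h1 : 1 ≤ daysP x := daysB_ge_one x.1 x.2
    have h2 := sum_daysP_nonneg l
    linarith

theorem adv1_advT (t : Int) (L : List (Int × Int)) : adv1 (advT t L) = advT (t + 1) L := by
  unfold adv1 advT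
  rw [List.map_map]
  apply List.map_congr_left
  intro x _
  simp only [Function.comp_apply, Prod.mk.injEq]
  exact ⟨by ring, trivial⟩

theorem advT_cons (t : Int) (x : Int × Int) (l : List (Int × Int)) :
    advT t (x :: l) = (x.1 + t * x.2, x.2) :: advT t l := rfl

theorem popP_advT (u : Int) (hu : 1 ≤ u) : ∀ (M : List (Int × Int)), (∀ z ∈ M, 0 < z.2) →
    popCountP (advT u M) = (M.takeWhile (fun z => decide (daysP z ≤ u))).length := by
  intro M
  induction M with
  | nil => intro _; rfl
  | cons z M' ih =>
    intro hpos
    rw [advT_cons]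
    have hiff := daysB_le_iff z.1 z.2 u (hpos z (List.mem_cons_self)) hu
    by_cases hz : daysP z ≤ u
    · rw [List.takeWhile_cons_of_pos (by simpa using hz)]
      simp only [popCountP]
      rw [if_pos (hiff.2 hz)]
      simp [ih (fun w hw => hpos w (List.mem_cons_of_mem _ hw))]
    · rw [List.takeWhile_cons_of_neg (by simpa using hz)]
      simp only [popCountP]
      rw [if_neg (fun hcon => hz (hiff.1 hcon))]
      simp

theorem takeWhile_ext {A : Type} (p q : A → Bool) :
    ∀ (l : List A), (∀ x ∈ l, p x = q x) → l.takeWhile p = l.takeWhile q := by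
  intro l
  induction l with
  | nil => intro _; rfl
  | cons z l' ih =>
    intro h
    rw [List.takeWhile_cons, List.takeWhile_cons, h z List.mem_cons_self,
      ih (fun w hw => h w (List.mem_cons_of_mem _ hw))]

theorem head_drop_takeWhile {A : Type} (P : A → Bool) :
    ∀ (l : List A) (y : A), (l.drop (l.takeWhile P).length).head? = some y → P y = false := by
  intro l
  induction l with
  | nil => intro y h; simp at h
  | cons z l' ih =>
    intro y h
    by_cases hz : P z
    · rw [List.takeWhile_cons_of_pos hz] at h
      simp only [List.length_cons, List.drop_succ_cons] at h
      exact ih y h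
    · rw [List.takeWhile_cons_of_neg (by simpa using hz)] at h
      simp only [List.length_nil, List.drop_zero, List.head?_cons, Option.some.injEq] at h
      subst h
      simpa using hz

theorem loopP_spec (fuel : Nat) : ∀ (t : Int) (L : List (Int × Int)) (ans : List Int),
    (∀ x ∈ L, 0 < x.2) → 0 ≤ t →
    (∀ x, L.head? = some x → t < daysP x) →
    (L.map daysP).sum ≤ (fuel : Int) + t →
    loopP fuel (advT t L) ans = ans ++ grp (L.map daysP) := by
  induction fuel with
  | zero =>
    intro t L ans hpos ht hhead hfuel
    cases L with
    | nil => simp [loopP, grp]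
    | cons x rest =>
      exfalso
      have h1 : t < daysP x := hhead x rfl
      have h2 : 0 ≤ (rest.map daysP).sum := sum_daysP_nonneg rest
      simp only [List.map_cons, List.sum_cons, Nat.cast_zero] at hfuel
      linarith
  | succ f ih =>
    intro t L ans hpos ht hhead hfuel
    cases L with
    | nil => simp [loopP, grp, advT]
    | cons x rest =>
      have hsx : 0 < x.2 := hpos x List.mem_cons_self
      have hd : t < daysP x := hhead x rfl
      have hiff := daysB_le_iff x.1 x.2 (t + 1) hsx (by omega)
      rw [advT_cons]
      simp only [loopP]
      have hh : ((adv1 ((x.1 + t * x.2, x.2) :: advT t rest)).headD (0, 0)).1 =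
          x.1 + (t + 1) * x.2 := by
        simp only [adv1, List.map_cons, List.headD_cons]
        ring
      rw [hh]
      rw [← advT_cons, adv1_advT]
      by_cases hcomp : 100 ≤ x.1 + (t + 1) * x.2
      · -- pop branch
        have hdx : daysP x = t + 1 := le_antisymm (hiff.1 hcomp) (by omega)
        rw [if_pos hcomp]
        rw [popP_advT (t + 1) (by omega) (x :: rest) hpos]
        set P : Int × Int → Bool := fun z => decide (daysP z ≤ t + 1) with hP
        have hPx : P x = true := by simp [hP, hdx]
        rw [List.takeWhile_cons_of_pos hPx]
        set w := (rest.takeWhile P).length with hw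
        have hklen : ((x :: rest.takeWhile P)).length = w + 1 := by rw [List.length_cons, ← hw]
        rw [hklen]
        have hdropadv : (advT (t + 1) (x :: rest)).drop (w + 1) = advT (t + 1) (rest.drop w) := by
          unfold advT
          rw [← List.map_drop]
          rfl
        rw [hdropadv]
        have ihres := ih (t + 1) (rest.drop w) (ans ++ [((w + 1 : Nat) : Int)])
          (fun z hz => hpos z (List.mem_cons_of_mem _ (List.mem_of_mem_drop hz)))
          (by omega)
          (fun y hy => by
            have hy' : (rest.drop ((List.takeWhile P rest).length)).head? = some y := by
              rw [← hw]; exact hy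
            have := head_drop_takeWhile P rest y hy'
            simp only [hP, decide_eq_false_iff_not, not_le] at this
            exact this)
          (by
            have hsplit : (rest.map daysP).sum =
                ((rest.take w).map daysP).sum + ((rest.drop w).map daysP).sum := by
              conv_lhs => rw [← List.take_append_drop w rest]
              rw [List.map_append, List.sum_append]
            have htk : 0 ≤ ((rest.take w).map daysP).sum := sum_daysP_nonneg _
            simp only [List.map_cons, List.sum_cons, Nat.cast_succ] at hfuel ⊢
            linarith [hsplit ▸ hfuel, hdx])
        rw [ihres]
        -- right-hand side: unfold grp once
        have hgrp : grp ((x :: rest).map daysP) =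
            ((1 : Int) + (w : Int)) :: grp ((rest.drop w).map daysP) := by
          simp only [List.map_cons]
          rw [grp]
          have htw : (rest.map daysP).takeWhile (fun y => y ≤ daysP x) =
              (rest.takeWhile P).map daysP := by
            rw [List.takeWhile_map]
            congr 1
            apply takeWhile_ext
            intro z _
            simp [hP, hdx, Function.comp]
          rw [htw]
          have hlw : ((rest.takeWhile P).map daysP).length = w := by simp [hw]
          rw [hlw, ← List.map_drop]
        rw [hgrp]
        simp only [List.append_assoc, List.cons_append,
          List.nil_append]
        congr 2
        push_cast
        ring
      · -- no-pop branch
        rw [if_neg hcomp]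
        refine ih (t + 1) (x :: rest) ans hpos (by omega) ?_ ?_
        · intro y hy
          simp only [List.head?_cons, Option.some.injEq] at hy
          subst hy
          by_contra hle
          refine hcomp (hiff.2 ?_)
          simp only [daysP] at hle
          omega
        · push_cast at hfuel
          linarith

def finB (st : List Int × Int × Int) : List Int :=
  if st.2.2 ≠ 0 then st.1 ++ [st.2.2] else st.1

def stepC (st : List Int × Int × Int) (c : Int) : List Int × Int × Int :=
  if st.2.1 < c then
    (if st.2.2 ≠ 0 then st.1 ++ [st.2.2] else st.1, c, 1)
  else
    (st.1, st.2.1, st.2.2 + 1)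

theorem foldC_spec (cs : List Int) : ∀ (ans : List Int) (cur cnt : Int), 1 ≤ cnt →
    finB (cs.foldl stepC (ans, cur, cnt)) =
      ans ++ [cnt + ((cs.takeWhile (fun y => y ≤ cur)).length : Int)]
        ++ grp (cs.drop (cs.takeWhile (fun y => y ≤ cur)).length) := by
  induction cs with
  | nil =>
    intro ans cur cnt hcnt
    simp only [List.foldl_nil, List.takeWhile_nil, List.length_nil, Nat.cast_zero,
      List.drop_nil]
    rw [grp]
    simp [finB, show cnt ≠ 0 by omega]
  | cons c cs' ih =>
    intro ans cur cnt hcnt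
    simp only [List.foldl_cons]
    by_cases h : cur < c
    · have hstep : stepC (ans, cur, cnt) c = (ans ++ [cnt], c, 1) := by
        simp [stepC, h, show cnt ≠ 0 by omega]
      rw [hstep, ih (ans ++ [cnt]) c 1 (by omega)]
      rw [List.takeWhile_cons_of_neg (by simpa using h)]
      simp only [List.length_nil, Nat.cast_zero, List.drop_zero]
      rw [grp]
      simp [List.append_assoc]
    · have hstep : stepC (ans, cur, cnt) c = (ans, cur, cnt + 1) := by
        simp [stepC, h]
      rw [hstep, ih ans cur (cnt + 1) (by omega)]
      rw [List.takeWhile_cons_of_pos (by simpa using not_lt.mp h)]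
      simp only [List.length_cons, List.drop_succ_cons]
      congr 3
      push_cast
      ring

theorem stepB_eq_stepC : stepB = fun st x => stepC st (daysP x) := rfl

theorem alt_eq_grp (ps ss : List Int) :
    solution_alt ps ss = grp ((ps.zip ss).map daysP) := by
  show finB ((ps.zip ss).foldl stepB ([], 0, 0)) = grp ((ps.zip ss).map daysP)
  rw [stepB_eq_stepC, ← List.foldl_map (f := daysP) (g := stepC)]
  cases hz : (ps.zip ss).map daysP with
  | nil => simp [finB, grp]
  | cons d ds =>
    have hd1 : 1 ≤ d := by
      have : d ∈ (ps.zip ss).map daysP := by rw [hz]; exact List.mem_cons_self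
      simp only [List.mem_map] at this
      obtain ⟨x, _, rfl⟩ := this
      exact daysB_ge_one x.1 x.2
    simp only [List.foldl_cons]
    have hstep : stepC (([] : List Int), 0, 0) d = ([], d, 1) := by
      simp [stepC, show (0:Int) < d by omega]
    rw [hstep, foldC_spec ds [] d 1 (by omega)]
    rw [grp]
    simp

theorem days_bound (p s : Int) (hs : 0 < s) :
    daysB p s ≤ (((101 - p).toNat : Int) + 1) := by
  unfold daysB
  have hN : (101 - p : Int) ≤ ((101 - p).toNat : Int) := Int.self_le_toNat _
  have hN0 : (0 : Int) ≤ ((101 - p).toNat : Int) := by positivity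
  rw [max_le_iff]
  constructor
  · omega
  · rw [neg_le, PySem.Int.le_floordiv_iff_mul_le hs, neg_mul]
    have hmul : (((101 - p).toNat : Int) + 1) * 1 ≤ (((101 - p).toNat : Int) + 1) * s := by
      apply mul_le_mul_of_nonneg_left (by omega) (by omega)
    linarith

-- ===== VERDICT (by name: the statement is the Claim_ definition above) =====
theorem advT_zero (L : List (Int × Int)) : advT 0 L = L := by
  unfold advT
  conv_rhs => rw [← List.map_id L]
  apply List.map_congr_left
  intro x _
  simp

theorem solution_spec : Claim_equal_solution := by
  intro ps ss _ hpre
  obtain ⟨hlen, hpos⟩ := hpre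
  unfold Spec_solution solution
  rw [loopA_eq_loopP _ ps ss [] hlen, alt_eq_grp]
  have hmain := loopP_spec ((ps.map (fun p => (101 - p).toNat + 1)).sum) 0 (ps.zip ss) []
    hpos (le_refl 0)
    (fun y _ => by
      have h1 : 1 ≤ daysP y := daysB_ge_one y.1 y.2
      omega)
    (by
      have hcast : (((ps.map (fun p => (101 - p).toNat + 1)).sum : Nat) : Int)
          = (ps.map (fun p => ((101 - p).toNat : Int) + 1)).sum := by
        rw [Nat.cast_list_sum, List.map_map]
        congr 1
      have hstep : ((ps.zip ss).map daysP).sum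
          ≤ ((ps.zip ss).map (fun x => ((101 - x.1).toNat : Int) + 1)).sum :=
        List.sum_le_sum (fun x hx => days_bound x.1 x.2 (hpos x hx))
      have hps : (ps.map (fun p => ((101 - p).toNat : Int) + 1))
          = (ps.zip ss).map (fun x => ((101 - x.1).toNat : Int) + 1) := by
        conv_lhs => rw [← List.map_fst_zip (l₁ := ps) (l₂ := ss) hlen]
        rw [List.map_map]
        rfl
      rw [hcast, hps]
      linarith)
  rw [advT_zero] at hmain
  rw [hmain]
  simp
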